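-- pv_equiv track=rewrite | github.com/jerrylee17/Algorithms | GoogleCompetitions/CodeJam/2021/QualRound/reverseSortEngineering.py | reverseCode
-- ===== SOURCE A (Python) =====
-- def reverseCode(arr):
--     cost = 0
--     for i in range(len(arr) - 1):
--         m = max(arr) + 1
--         j = 0
--         for x in range(i, len(arr)):
--             if arr[x] < m:
--                 m = arr[x]
--                 j = x
--         cost += j-i+1
--         arr = arr[:i] + arr[i:j+1][::-1] + arr[j+1:]
--     return cost
-- ===== SOURCE B (Python) =====
-- def reverseCode(arr):
--     cost = 0
--     cur = list(arr)
--     while len(cur) > 1: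
--         j = cur.index(min(cur))
--         cost += j + 1
--         cur = cur[:j+1][::-1][1:] + cur[j+1:]
--     return cost
-- ===== Notes on version B (the rewrite author's own statement) =====
-- stated objective: faster
-- what changed: B drops the fixed prefix instead of carrying it: a shrinking-suffix loop that finds the first minimum with min()/index() (no per-step max(arr) sentinel scan and no rebuilding of the untouched prefix), adding j+1 per step.
import Mathlib
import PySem

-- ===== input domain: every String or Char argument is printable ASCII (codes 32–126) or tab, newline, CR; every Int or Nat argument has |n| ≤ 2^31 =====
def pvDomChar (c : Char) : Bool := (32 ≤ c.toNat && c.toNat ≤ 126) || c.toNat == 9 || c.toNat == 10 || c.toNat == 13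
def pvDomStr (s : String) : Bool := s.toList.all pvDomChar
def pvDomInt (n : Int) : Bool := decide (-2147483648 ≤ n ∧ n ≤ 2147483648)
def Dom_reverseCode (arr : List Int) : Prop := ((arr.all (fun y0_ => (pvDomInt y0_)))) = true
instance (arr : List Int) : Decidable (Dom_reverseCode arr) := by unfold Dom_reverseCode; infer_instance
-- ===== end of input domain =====

-- B replaces A's index loop over the whole array (with a max(arr)+1 sentinel scan and full-array
-- rebuild each step) by a shrinking-suffix loop using first-min/index; ~constant-factor faster.

-- ===== PORT A =====
-- one step of A's outer 'for i in range(len(arr)-1)' loop; state = (cost, arr)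
def reverseCodeStep (st : Int × List Int) (i : Int) : Int × List Int :=
  let a := st.2
  -- m = max(arr) + 1 : the loop body only runs when arr is nonempty, so the default 0 is unreachable
  let m0 : Int := (PySem.List.max? a (fun y => y)).getD 0 + 1
  -- for x in range(i, len(arr)): if arr[x] < m: m, j = arr[x], x   (arr[x] in range, so pyGetD is exact)
  let mj := (PySem.List.pyRange i (a.length : Int) 1).foldl
    (fun (mj : Int × Int) x =>
      if PySem.List.pyGetD a x 0 < mj.1 then (PySem.List.pyGetD a x 0, x) else mj)
    (m0, 0)
  let j := mj.2
  (st.1 + (j - i + 1),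
    -- arr[:i] + arr[i:j+1][::-1] + arr[j+1:]   ([::-1] is reverse: PySem.List.slice?_none_none_neg_one)
    PySem.List.slice a none (some i) ++ (PySem.List.slice a (some i) (some (j + 1))).reverse
      ++ PySem.List.slice a (some (j + 1)) none)

def reverseCode (arr : List Int) : Int :=
  ((PySem.List.pyRange 0 ((arr.length : Int) - 1) 1).foldl reverseCodeStep (0, arr)).1

-- ===== PORT B =====
-- the 'while len(cur) > 1' loop of Source B, with accumulator cost
def reverseCodeAltLoop (cost : Int) (cur : List Int) : Int :=
  if 1 < cur.length then
    match PySem.List.min? cur (fun y => y) with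
    | none => cost          -- unreachable: cur ≠ []
    | some m =>
      match h2 : PySem.List.index? cur m with
      | none => cost        -- unreachable: m ∈ cur
      | some j =>
        -- cur = cur[:j+1][::-1][1:] + cur[j+1:]   ([::-1] is reverse; [1:] is tail)
        reverseCodeAltLoop (cost + ((j : Int) + 1))
          (PySem.List.slice (PySem.List.slice cur none (some ((j : Int) + 1))).reverse (some 1) none
            ++ PySem.List.slice cur (some ((j : Int) + 1)) none)
  else cost
termination_by cur.length
decreasing_by
  obtain ⟨hk, -, -⟩ := PySem.List.getElem_of_index?_eq_some h2
  rw [PySem.List.slice_from_one, PySem.List.slice_to _ (by positivity), PySem.List.slice_from _ (by positivity)]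
  simp
  omega

def reverseCode_alt (arr : List Int) : Int := reverseCodeAltLoop 0 arr

-- ===== PRECONDITION & SPEC =====
def Spec_reverseCode (arr : List Int) (out : Int) : Prop := out = reverseCode_alt arr
instance (arr : List Int) (out : Int) : Decidable (Spec_reverseCode arr out) := by unfold Spec_reverseCode; infer_instance

-- ===== CLAIM (what is proved, stated in full; the proofs are below) =====
def Claim_equal_reverseCode : Prop := ∀ (arr : List Int), Dom_reverseCode arr → Spec_reverseCode arr (reverseCode arr)

-- ===== LEMMAS AND PROOFS =====

-- first minimum of a list together with the index of its first occurrence (junk (0,0) on [])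
def pvFm : List Int → Int × Nat
  | [] => (0, 0)
  | [x] => (x, 0)
  | x :: y :: t =>
    let r := pvFm (y :: t)
    if r.1 < x then (r.1, r.2 + 1) else (x, 0)

lemma pvFoldlMinShift : ∀ (t : List Int) (a b : Int),
    List.foldl min (min a b) t = min a (List.foldl min b t) := by
  intro t
  induction t with
  | nil => intro a b; rfl
  | cons y t ih =>
    intro a b
    simp only [List.foldl_cons, min_assoc]
    exact ih a (min b y)

lemma pvFm_min : ∀ (t : List Int) (x : Int), (pvFm (x :: t)).1 = t.foldl min x := by
  intro t
  induction t with
  | nil => intro x; rfl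
  | cons y t ih =>
    intro x
    show (if (pvFm (y :: t)).1 < x then ((pvFm (y :: t)).1, (pvFm (y :: t)).2 + 1) else (x, 0)).1
        = List.foldl min (min x y) t
    rw [pvFoldlMinShift, ← ih]
    split_ifs with h <;> omega

lemma pvFm_index : ∀ (t : List Int) (x : Int),
    PySem.List.index? (x :: t) (pvFm (x :: t)).1 = some (pvFm (x :: t)).2 := by
  intro t
  induction t with
  | nil => intro x; exact PySem.List.index?_cons_self x []
  | cons y t ih =>
    intro x
    have e : pvFm (x :: y :: t)
        = if (pvFm (y :: t)).1 < x then ((pvFm (y :: t)).1, (pvFm (y :: t)).2 + 1) else (x, 0) := rfl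
    rw [e]
    split_ifs with h
    · show PySem.List.index? (x :: y :: t) (pvFm (y :: t)).1 = some ((pvFm (y :: t)).2 + 1)
      rw [PySem.List.index?_cons_of_ne _ (by omega), ih y]
      rfl
    · exact PySem.List.index?_cons_self x (y :: t)

-- A's inner scan, rewritten over enumerate, computes the first minimum when the sentinel dominates
lemma pvScan_gen : ∀ (l : List Int) (i0 m j : Int),
    (PySem.List.enumerate l i0).foldl
        (fun (mj : Int × Int) p => if p.2 < mj.1 then (p.2, p.1) else mj) (m, j)
      = if (pvFm l).1 < m ∧ l ≠ [] then ((pvFm l).1, i0 + (pvFm l).2) else (m, j) := by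
  intro l
  induction l with
  | nil => intro i0 m j; simp [PySem.List.enumerate_nil]
  | cons x xs ih =>
    intro i0 m j
    rw [PySem.List.enumerate_cons, List.foldl_cons]
    cases xs with
    | nil =>
      by_cases h : x < m <;>
        simp [PySem.List.enumerate_nil, pvFm, h]
    | cons y t =>
      have e : pvFm (x :: y :: t)
          = if (pvFm (y :: t)).1 < x then ((pvFm (y :: t)).1, (pvFm (y :: t)).2 + 1) else (x, 0) := rfl
      by_cases h : x < m
      · simp only [h, if_pos]
        rw [ih (i0 + 1) x i0, e]
        by_cases h2 : (pvFm (y :: t)).1 < x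
        · simp only [h2, if_pos]
          have : (pvFm (y :: t)).1 < m := by omega
          simp [this]
          ring
        · simp [h2, h]
      · simp only [if_neg h]
        rw [ih (i0 + 1) m j, e]
        by_cases h2 : (pvFm (y :: t)).1 < m
        · have hx : (pvFm (y :: t)).1 < x := by omega
          simp [h2, hx]
          ring
        · have : ¬ ((if (pvFm (y :: t)).1 < x then ((pvFm (y :: t)).1, (pvFm (y :: t)).2 + 1) else (x, 0)).1 < m) := by
            split_ifs <;> omega
          simp [h2, this]

-- indices i0..i0+|l| of p++l, paired with their values, are exactly 'enumerate l i0'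
lemma pvMap_idx_val : ∀ (l p : List Int) (d : Int),
    (PySem.List.pyRange (p.length : Int) ((p.length : Int) + (l.length : Int)) 1).map
        (fun x => (x, PySem.List.pyGetD (p ++ l) x d))
      = PySem.List.enumerate l (p.length : Int) := by
  intro l
  induction l with
  | nil =>
    intro p d
    rw [PySem.List.pyRange_one_eq_nil (by simp)]
    simp [PySem.List.enumerate_nil]
  | cons x xs ih =>
    intro p d
    rw [PySem.List.pyRange_one_cons (by push_cast [List.length_cons]; omega), List.map_cons,
      PySem.List.enumerate_cons]
    have hv : PySem.List.pyGetD (p ++ x :: xs) (p.length : Int) d = x := by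
      rw [PySem.List.pyGetD_natCast]
      simp [List.getD_eq_getElem?_getD]
    have hrest : (PySem.List.pyRange ((p.length : Int) + 1)
          ((p.length : Int) + ((x :: xs).length : Int))).map
          (fun z => (z, PySem.List.pyGetD (p ++ x :: xs) z d))
        = PySem.List.enumerate xs ((p.length : Int) + 1) := by
      have hl : (p ++ x :: xs) = (p ++ [x]) ++ xs := by simp
      have h1 : ((p.length : Int) + 1) = (((p ++ [x]).length : Nat) : Int) := by simp
      have h2 : ((p.length : Int) + ((x :: xs).length : Int))
          = (((p ++ [x]).length : Nat) : Int) + ((xs.length : Nat) : Int) := by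
        push_cast [List.length_cons, List.length_append, List.length_nil]
        ring
      rw [hl, h1, h2, ih (p ++ [x]) d, h1.symm]
    rw [hv, hrest]

-- reversing take (k+1) exposes the minimum at the front
lemma pvTakeRev (l : List Int) (k : Nat) (M : Int) (hk : k < l.length) (hget : l[k] = M) :
    (l.take (k + 1)).reverse = M :: (l.take k).reverse := by
  rw [List.take_add_one]
  simp [List.getElem?_eq_getElem hk, hget]

-- one step of A's outer loop, from position |p| on p ++ l, computed in closed form
lemma pvStep (p l : List Int) (c : Int) (hl : 2 ≤ l.length) :
    reverseCodeStep (c, p ++ l) (p.length : Int)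
      = (c + ((pvFm l).2 + 1 : Int),
         (p ++ [(pvFm l).1]) ++ ((l.take (pvFm l).2).reverse ++ l.drop ((pvFm l).2 + 1))) := by
  have hne : l ≠ [] := by intro h; subst h; simp at hl
  have hidx : PySem.List.index? l (pvFm l).1 = some (pvFm l).2 := by
    obtain ⟨x, xs, rfl⟩ := List.exists_cons_of_ne_nil hne
    exact pvFm_index xs x
  obtain ⟨hk, hgetk, -⟩ := PySem.List.getElem_of_index?_eq_some hidx
  have hmem : (pvFm l).1 ∈ l := hgetk ▸ List.getElem_mem hk
  cases hM : PySem.List.max? (p ++ l) (fun y => y) with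
  | none =>
    rw [PySem.List.max?_eq_none_iff] at hM
    exact absurd (by simp at hM; exact hM.2) hne
  | some mx =>
    have hub : ∀ y ∈ l, y ≤ mx := fun y hy =>
      PySem.List.max?_isMax hM y (List.mem_append_right p hy)
    simp only [reverseCodeStep, hM, Option.getD_some]
    -- the inner index scan, as a fold over enumerate l
    have hrw : (PySem.List.pyRange (p.length : Int) (((p ++ l).length : Nat) : Int) 1).foldl
          (fun (mj : Int × Int) x =>
            if PySem.List.pyGetD (p ++ l) x 0 < mj.1 then (PySem.List.pyGetD (p ++ l) x 0, x) else mj)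
          (mx + 1, 0)
        = ((pvFm l).1, (p.length : Int) + (pvFm l).2) := by
      have hb : (((p ++ l).length : Nat) : Int) = (p.length : Int) + (l.length : Int) := by
        push_cast [List.length_append]
        ring
      have hcond : (pvFm l).1 < mx + 1 ∧ l ≠ [] := ⟨by have := hub _ hmem; omega, hne⟩
      have e1 : ((PySem.List.pyRange (p.length : Int) ((p.length : Int) + (l.length : Int)) 1).map
            (fun x => (x, PySem.List.pyGetD (p ++ l) x 0))).foldl
            (fun (mj : Int × Int) q => if q.2 < mj.1 then (q.2, q.1) else mj) (mx + 1, 0)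
          = (PySem.List.pyRange (p.length : Int) ((p.length : Int) + (l.length : Int)) 1).foldl
            (fun (mj : Int × Int) x =>
              if PySem.List.pyGetD (p ++ l) x 0 < mj.1 then (PySem.List.pyGetD (p ++ l) x 0, x) else mj)
            (mx + 1, 0) := by
        rw [List.foldl_map]
      rw [hb, ← e1, pvMap_idx_val l p 0, pvScan_gen l (p.length : Int) (mx + 1) 0,
        if_pos hcond]
    rw [hrw]
    have hto : ((p.length : Int) + ((pvFm l).2 : Int) + 1).toNat = p.length + ((pvFm l).2 + 1) := by
      omega
    have hto2 : ((p.length : Int)).toNat = p.length := by omega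
    rw [PySem.List.slice_to _ (by positivity),
      PySem.List.slice_toNat _ (by positivity) (by positivity),
      PySem.List.slice_from _ (by positivity), hto, hto2]
    simp only [Prod.mk.injEq]
    constructor
    · ring
    · have hdrop : (p ++ l).drop (p.length + ((pvFm l).2 + 1)) = l.drop ((pvFm l).2 + 1) := by
        simp [List.drop_append]
      have h3 : p.length + ((pvFm l).2 + 1) - p.length = (pvFm l).2 + 1 := by omega
      rw [hdrop, h3, List.drop_left, pvTakeRev l (pvFm l).2 (pvFm l).1 hk hgetk]
      simp

-- one step of B's loop, for a list of length ≥ 2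
lemma pvAltStep (l : List Int) (c : Int) (hl : 2 ≤ l.length) :
    reverseCodeAltLoop c l
      = reverseCodeAltLoop (c + ((pvFm l).2 + 1 : Int))
          ((l.take (pvFm l).2).reverse ++ l.drop ((pvFm l).2 + 1)) := by
  have hne : l ≠ [] := by intro h; subst h; simp at hl
  have hidx : PySem.List.index? l (pvFm l).1 = some (pvFm l).2 := by
    obtain ⟨x, xs, rfl⟩ := List.exists_cons_of_ne_nil hne
    exact pvFm_index xs x
  obtain ⟨hk, hgetk, -⟩ := PySem.List.getElem_of_index?_eq_some hidx
  have hmin : PySem.List.min? l (fun y => y) = some (pvFm l).1 := by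
    obtain ⟨x, xs, rfl⟩ := List.exists_cons_of_ne_nil hne
    rw [PySem.List.min?_id_cons, pvFm_min xs x]
  conv_lhs => rw [reverseCodeAltLoop]
  rw [if_pos (show 1 < l.length by omega)]
  simp only [hmin]
  split
  next h2 => rw [hidx] at h2; cases h2
  next j h2 =>
    rw [hidx] at h2
    injection h2 with hj
    subst hj
    have hto : (((pvFm l).2 : Int) + 1).toNat = (pvFm l).2 + 1 := by omega
    rw [PySem.List.slice_to _ (by positivity), PySem.List.slice_from_one,
      PySem.List.slice_from _ (by positivity), hto,
      pvTakeRev l (pvFm l).2 (pvFm l).1 hk hgetk]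
    rfl

-- main loop correspondence: A's loop from i = |p| on p ++ l equals B's loop on the suffix l
lemma pvMainAux : ∀ (N : Nat) (l p : List Int) (c : Int), l.length ≤ N →
    ((PySem.List.pyRange (p.length : Int) ((p.length : Int) + (l.length : Int) - 1) 1).foldl
        reverseCodeStep (c, p ++ l)).1 = reverseCodeAltLoop c l := by
  intro N
  induction N with
  | zero =>
    intro l p c hN
    have hl : l = [] := List.length_eq_zero_iff.mp (by omega)
    subst hl
    rw [PySem.List.pyRange_one_eq_nil (by push_cast [List.length_nil, List.length_cons]; omega), reverseCodeAltLoop]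
    simp
  | succ N ih =>
    intro l p c hN
    by_cases hs : l.length ≤ 1
    · rw [PySem.List.pyRange_one_eq_nil (by push_cast [List.length_nil, List.length_cons]; omega), reverseCodeAltLoop]
      have : ¬ 1 < l.length := by omega
      simp [this]
    · have hl : 2 ≤ l.length := by omega
      have hidx : PySem.List.index? l (pvFm l).1 = some (pvFm l).2 := by
        obtain ⟨x, xs, rfl⟩ := List.exists_cons_of_ne_nil (show l ≠ [] by intro h; subst h; simp at hl)
        exact pvFm_index xs x
      obtain ⟨hk, hgetk, -⟩ := PySem.List.getElem_of_index?_eq_some hidx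
      have hlen' : ((l.take (pvFm l).2).reverse ++ l.drop ((pvFm l).2 + 1)).length = l.length - 1 := by
        simp
        omega
      rw [PySem.List.pyRange_one_cons (by push_cast; omega), List.foldl_cons,
        pvStep p l c hl]
      have h1 : (p.length : Int) + 1 = (((p ++ [(pvFm l).1]).length : Nat) : Int) := by simp
      have h2 : (p.length : Int) + (l.length : Int) - 1
          = (((p ++ [(pvFm l).1]).length : Nat) : Int)
            + ((((l.take (pvFm l).2).reverse ++ l.drop ((pvFm l).2 + 1)).length : Nat) : Int) - 1 := by
        rw [hlen']
        push_cast [List.length_append, List.length_nil, List.length_cons]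
        omega
      rw [h1, h2, ih _ _ _ (by rw [hlen']; omega), ← pvAltStep l c hl]

lemma pvMain : ∀ (l p : List Int) (c : Int),
    ((PySem.List.pyRange (p.length : Int) ((p.length : Int) + (l.length : Int) - 1) 1).foldl
        reverseCodeStep (c, p ++ l)).1 = reverseCodeAltLoop c l := by
  intro l p c
  exact pvMainAux l.length l p c le_rfl

-- ===== VERDICT (by name: the statement is the Claim_ definition above) =====
theorem reverseCode_spec : Claim_equal_reverseCode := by
  intro arr _
  unfold Spec_reverseCode reverseCode reverseCode_alt
  have := pvMain arr [] 0
  simpa using this
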